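-- pv_equiv track=rewrite | github.com/ushakov/remsearch | desktop/ioutils.py | Int32ToStr
-- ===== SOURCE A (Python) =====
-- def Int32ToStr(num):
--   result = ''
--   assert num < 2**32
--   assert num >= 0
--   for _ in range(4):
--     char = chr(num & 255)
--     result = char + result
--     num >>= 8
--   return result
-- ===== SOURCE B (Python) =====
-- import struct
--
-- def Int32ToStr(num):
--   assert num < 2**32
--   assert num >= 0
--   return struct.pack('>I', num).decode('latin-1')
-- ===== Notes on version B (the rewrite author's own statement) =====
-- stated objective: idiomatic
-- what changed: Replaced the 4-iteration shift-mask-and-prepend loop with a single closed-form struct.pack('>I', num).decode('latin-1'); no loop or accumulator remains.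
import Mathlib
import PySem

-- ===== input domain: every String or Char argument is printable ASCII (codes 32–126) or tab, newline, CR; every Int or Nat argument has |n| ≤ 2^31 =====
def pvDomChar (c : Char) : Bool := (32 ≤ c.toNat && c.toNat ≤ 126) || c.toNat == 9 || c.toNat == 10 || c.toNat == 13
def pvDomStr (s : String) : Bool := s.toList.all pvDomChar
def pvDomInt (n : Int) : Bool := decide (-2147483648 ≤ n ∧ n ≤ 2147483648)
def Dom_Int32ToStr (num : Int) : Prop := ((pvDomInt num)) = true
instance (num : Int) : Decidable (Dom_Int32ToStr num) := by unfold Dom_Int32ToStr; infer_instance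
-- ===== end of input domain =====

-- B replaces A's 4-iteration shift-and-prepend loop with one closed-form struct.pack
-- call (extracting the four big-endian bytes directly); return value only, idiomatic.

-- ===== PORT A =====
-- loop: result = chr(num & 255) + result; num >>= 8   (for num ≥ 0, num & 255 = num % 256, num >> 8 = num // 256)
def Int32ToStr (num : Int) : String :=
  (((PySem.List.pyRange 0 4 1).foldl
    (fun (st : String × Int) (_ : Int) =>
      let char := Char.ofNat (PySem.Int.mod st.2 256).toNat
      (String.singleton char ++ st.1, PySem.Int.floordiv st.2 256)) ("", num))).1

-- ===== PORT B =====
-- struct.pack('>I', num).decode('latin-1'): the four big-endian bytes of num, as chars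
def Int32ToStr_alt (num : Int) : String :=
  String.ofList [Char.ofNat (PySem.Int.mod (PySem.Int.floordiv num 16777216) 256).toNat,
             Char.ofNat (PySem.Int.mod (PySem.Int.floordiv num 65536) 256).toNat,
             Char.ofNat (PySem.Int.mod (PySem.Int.floordiv num 256) 256).toNat,
             Char.ofNat (PySem.Int.mod num 256).toNat]

-- ===== PRECONDITION & SPEC =====
-- A's two asserts: AssertionError unless 0 ≤ num < 2^32
def Pre_Int32ToStr (num : Int) : Prop := 0 ≤ num ∧ num < 4294967296
instance (num : Int) : Decidable (Pre_Int32ToStr num) := by unfold Pre_Int32ToStr; infer_instance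
def pvWitness_Int32ToStr : Int := (5)
def Spec_Int32ToStr (num : Int) (out : String) : Prop := out = Int32ToStr_alt num
instance (num : Int) (out : String) : Decidable (Spec_Int32ToStr num out) := by unfold Spec_Int32ToStr; infer_instance

-- ===== CLAIM (what is proved, stated in full; the proofs are below) =====
def Claim_equal_Int32ToStr : Prop := ∀ (num : Int), Dom_Int32ToStr num → Pre_Int32ToStr num → Spec_Int32ToStr num (Int32ToStr num)

-- ===== LEMMAS AND PROOFS =====

-- ===== VERDICT (by name: the statement is the Claim_ definition above) =====
theorem Int32ToStr_spec : Claim_equal_Int32ToStr := by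
  intro num _ hp
  obtain ⟨h0, _⟩ := hp
  unfold Spec_Int32ToStr Int32ToStr Int32ToStr_alt
  have h256 : (0:Int) < 256 := by decide
  have hr : PySem.List.pyRange 0 4 1 = [0, 1, 2, 3] := by decide
  rw [hr]
  have h65536 : (0:Int) < 65536 := by decide
  have h2p24 : (0:Int) < 16777216 := by decide
  simp only [List.foldl, PySem.Int.mod_eq_emod_of_pos h256,
    PySem.Int.floordiv_eq_ediv_of_pos h256,
    PySem.Int.floordiv_eq_ediv_of_pos h65536,
    PySem.Int.floordiv_eq_ediv_of_pos h2p24]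
  have e1 : num / 256 / 256 = num / 65536 := by omega
  have e2 : num / 65536 / 256 = num / 16777216 := by omega
  rw [e1, e2]
  rw [← String.toList_inj]
  simp
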